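-- pv_equiv track=rewrite | github.com/vschs007/scrapcodes | testestest.py | computeDeviceCrossovers
-- ===== SOURCE A (Python) =====
-- def computeDeviceCrossovers(n, websiteVisits, m, appVisits):
--     res = []
--     cnt = 0
--     if n == 0 or m == 0:
--         return 0
--     for i in range(n):
--         res.append([websiteVisits[i], 'w'])
--     for i in range(m):
--         res.append([appVisits[i], 'a'])
--     res = sorted(res)
--
--     for i in range(1, len(res)):
--         if res[i - 1][1] != res[i][1]:
--             cnt += 1
--     return cnt
-- ===== SOURCE B (Python) =====
-- def computeDeviceCrossovers(n, websiteVisits, m, appVisits):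
--     if n <= 0 or m <= 0:
--         return 0
--     ws = sorted(websiteVisits[:n])
--     ap = sorted(appVisits[:m])
--     cnt = 0
--     i = 0
--     j = 0
--     prev = None
--     while i < len(ws) or j < len(ap):
--         if j < len(ap) and (i >= len(ws) or ap[j] <= ws[i]):
--             lab = 'a'
--             j += 1
--         else:
--             lab = 'w'
--             i += 1
--         if prev is not None and lab != prev:
--             cnt += 1
--         prev = lab
--     return cnt
-- ===== Notes on version B (the rewrite author's own statement) =====
-- stated objective: alternative
-- what changed: Instead of sorting one combined [value,label] pair list and index-scanning it for adjacent label changes, B sorts the two visit prefixes separately and merges them with two cursors (value ties emit the app element first), counting label switches on the fly.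
import Mathlib
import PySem

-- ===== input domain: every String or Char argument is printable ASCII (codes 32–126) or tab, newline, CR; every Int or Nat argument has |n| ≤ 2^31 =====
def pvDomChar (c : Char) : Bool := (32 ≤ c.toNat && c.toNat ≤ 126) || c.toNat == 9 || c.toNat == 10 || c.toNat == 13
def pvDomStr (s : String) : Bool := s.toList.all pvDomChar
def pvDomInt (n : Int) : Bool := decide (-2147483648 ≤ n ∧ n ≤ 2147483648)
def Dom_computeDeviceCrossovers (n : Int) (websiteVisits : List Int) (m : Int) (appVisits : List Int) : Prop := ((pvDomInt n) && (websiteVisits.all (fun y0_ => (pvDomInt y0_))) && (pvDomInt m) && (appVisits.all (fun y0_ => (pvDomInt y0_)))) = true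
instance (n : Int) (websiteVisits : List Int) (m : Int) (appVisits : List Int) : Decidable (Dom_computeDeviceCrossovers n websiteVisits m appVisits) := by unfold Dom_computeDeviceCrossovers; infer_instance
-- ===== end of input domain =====

-- B replaces 'sort one combined tagged list, then index-scan it' by 'sort the two visit lists
-- separately and merge them with two cursors (ties app-first), counting label switches on the fly'.

-- ===== PORT A =====
def computeDeviceCrossovers (n : Int) (websiteVisits : List Int) (m : Int) (appVisits : List Int) : Int :=
  if n = 0 ∨ m = 0 then 0
  else
    let res1 : List (Int × Char) :=
      (PySem.List.pyRange 0 n 1).foldl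
        (fun acc i => acc ++ [(PySem.List.pyGetD websiteVisits i 0, 'w')]) []
    let res2 : List (Int × Char) :=
      (PySem.List.pyRange 0 m 1).foldl
        (fun acc i => acc ++ [(PySem.List.pyGetD appVisits i 0, 'a')]) res1
    let res : List (Int × Char) := PySem.List.sorted2 res2 Prod.fst Prod.snd
    (PySem.List.pyRange 1 ((res.length : Int)) 1).foldl
      (fun cnt i =>
        if (PySem.List.pyGetD res (i - 1) ((0 : Int), ' ')).2 ≠ (PySem.List.pyGetD res i ((0 : Int), ' ')).2
        then cnt + 1 else cnt) 0

-- ===== PORT B =====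
-- 'if prev is not None and lab != prev: cnt += 1'
def pvBump (prev : Option Char) (lab : Char) (cnt : Int) : Int :=
  match prev with
  | none => cnt
  | some p => if lab ≠ p then cnt + 1 else cnt

-- the two-cursor while loop of Source B (the cursors become the unread suffixes of ws/ap)
def pvLoop : List Int → List Int → Option Char → Int → Int
  | [], [], _, cnt => cnt
  | [], _ :: ap, prev, cnt => pvLoop [] ap (some 'a') (pvBump prev 'a' cnt)
  | _ :: ws', [], prev, cnt => pvLoop ws' [] (some 'w') (pvBump prev 'w' cnt)
  | w :: ws', a :: ap, prev, cnt =>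
      if a ≤ w then pvLoop (w :: ws') ap (some 'a') (pvBump prev 'a' cnt)
      else pvLoop ws' (a :: ap) (some 'w') (pvBump prev 'w' cnt)
termination_by ws ap _ _ => ws.length + ap.length
decreasing_by all_goals (simp only [List.length_cons]; omega)

def computeDeviceCrossovers_alt (n : Int) (websiteVisits : List Int) (m : Int) (appVisits : List Int) : Int :=
  if n ≤ 0 ∨ m ≤ 0 then 0
  else
    let ws := PySem.List.sorted (PySem.List.slice websiteVisits none (some n)) (fun x => x)
    let ap := PySem.List.sorted (PySem.List.slice appVisits none (some m)) (fun x => x)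
    pvLoop ws ap none 0

-- ===== PRECONDITION & SPEC =====
-- Pre_ excludes exactly the inputs where Python A raises IndexError: a positive n (resp. m)
-- exceeding the length of websiteVisits (resp. appVisits), unless the early 'n == 0 or m == 0' return fires.
def Pre_computeDeviceCrossovers (n : Int) (websiteVisits : List Int) (m : Int) (appVisits : List Int) : Prop :=
  n = 0 ∨ m = 0 ∨ (n ≤ (websiteVisits.length : Int) ∧ m ≤ (appVisits.length : Int))
instance (n : Int) (websiteVisits : List Int) (m : Int) (appVisits : List Int) : Decidable (Pre_computeDeviceCrossovers n websiteVisits m appVisits) := by unfold Pre_computeDeviceCrossovers; infer_instance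

def pvWitness_computeDeviceCrossovers : Int × List Int × Int × List Int := (2, [3, 1], 2, [2, 4])

def Spec_computeDeviceCrossovers (n : Int) (websiteVisits : List Int) (m : Int) (appVisits : List Int) (out : Int) : Prop := out = computeDeviceCrossovers_alt n websiteVisits m appVisits
instance (n : Int) (websiteVisits : List Int) (m : Int) (appVisits : List Int) (out : Int) : Decidable (Spec_computeDeviceCrossovers n websiteVisits m appVisits out) := by unfold Spec_computeDeviceCrossovers; infer_instance

-- ===== CLAIM (what is proved, stated in full; the proofs are below) =====
def Claim_equal_computeDeviceCrossovers : Prop := ∀ (n : Int) (websiteVisits : List Int) (m : Int) (appVisits : List Int), Dom_computeDeviceCrossovers n websiteVisits m appVisits → Pre_computeDeviceCrossovers n websiteVisits m appVisits → Spec_computeDeviceCrossovers n websiteVisits m appVisits (computeDeviceCrossovers n websiteVisits m appVisits)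

-- ===== LEMMAS AND PROOFS =====

theorem pvWitness_ok :
    Dom_computeDeviceCrossovers (pvWitness_computeDeviceCrossovers.1) (pvWitness_computeDeviceCrossovers.2.1) (pvWitness_computeDeviceCrossovers.2.2.1) (pvWitness_computeDeviceCrossovers.2.2.2) ∧
    Pre_computeDeviceCrossovers (pvWitness_computeDeviceCrossovers.1) (pvWitness_computeDeviceCrossovers.2.1) (pvWitness_computeDeviceCrossovers.2.2.1) (pvWitness_computeDeviceCrossovers.2.2.2) := by
  decide

-- proof-only reference merge of the two sorted visit lists (ties app-first), at pair level
def pvMergeP : List Int → List Int → List (Int × Char)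
  | [], [] => []
  | [], a :: ap => (a, 'a') :: pvMergeP [] ap
  | w :: ws', [] => (w, 'w') :: pvMergeP ws' []
  | w :: ws', a :: ap =>
      if a ≤ w then (a, 'a') :: pvMergeP (w :: ws') ap
      else (w, 'w') :: pvMergeP ws' (a :: ap)
termination_by ws ap => ws.length + ap.length
decreasing_by all_goals (simp only [List.length_cons]; omega)

theorem pvMergeP_nil_nil : pvMergeP [] [] = [] := by rw [pvMergeP.eq_def]
theorem pvMergeP_nil_cons (a : Int) (ap : List Int) : pvMergeP [] (a :: ap) = (a, 'a') :: pvMergeP [] ap := by rw [pvMergeP.eq_def]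
theorem pvMergeP_cons_nil (w : Int) (ws' : List Int) : pvMergeP (w :: ws') [] = (w, 'w') :: pvMergeP ws' [] := by rw [pvMergeP.eq_def]
theorem pvMergeP_cons_cons (w a : Int) (ws' ap : List Int) :
    pvMergeP (w :: ws') (a :: ap) = if a ≤ w then (a, 'a') :: pvMergeP (w :: ws') ap
      else (w, 'w') :: pvMergeP ws' (a :: ap) := by rw [pvMergeP.eq_def]

-- transition counter along a tagged list, given the previous label
def pvAdj : Char → List (Int × Char) → Int → Int
  | _, [], c => c
  | p, (_, l) :: t, c => pvAdj l t (if p ≠ l then c + 1 else c)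

theorem pvGetD_cons_pos {x : Int × Char} {xs : List (Int × Char)} {i : Int} (h : 0 < i) (d : Int × Char) :
    PySem.List.pyGetD (x :: xs) i d = PySem.List.pyGetD xs (i - 1) d := by
  obtain ⟨k, rfl⟩ : ∃ k : Nat, i = (k : Int) + 1 := ⟨(i - 1).toNat, by omega⟩
  have h2 : (k : Int) + 1 - 1 = (k : Int) := by omega
  rw [PySem.List.pyGetD, PySem.List.pyGetD, h2, PySem.List.pyGet?_cons_succ]

theorem pvRange_shift (a b : Int) :
    PySem.List.pyRange (a + 1) (b + 1) 1 = (PySem.List.pyRange a b 1).map (· + 1) := by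
  rw [PySem.List.pyRange_one, PySem.List.pyRange_one, List.map_map]
  have : b + 1 - (a + 1) = b - a := by omega
  rw [this]
  exact List.map_congr_left (fun k _ => by simp; omega)

-- A's index scan over res = x :: t equals pvAdj x.2 t
theorem pvFold_eq_adj (t : List (Int × Char)) : ∀ (x : Int × Char) (c : Int),
    (PySem.List.pyRange 1 (((x :: t).length : Int)) 1).foldl
      (fun cnt i =>
        if (PySem.List.pyGetD (x :: t) (i - 1) ((0 : Int), ' ')).2 ≠ (PySem.List.pyGetD (x :: t) i ((0 : Int), ' ')).2
        then cnt + 1 else cnt) c = pvAdj x.2 t c := by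
  induction t with
  | nil =>
    intro x c
    rw [show (((([x] : List (Int × Char))).length : Int)) = 1 by simp,
      PySem.List.pyRange_one_eq_nil le_rfl]
    rfl
  | cons y t' ih =>
    intro x c
    obtain ⟨vy, ly⟩ := y
    set L : Int := (((x :: (vy, ly) :: t').length : Int)) with hLdef
    have hL : L = (t'.length : Int) + 2 := by simp [hLdef]; omega
    rw [PySem.List.pyRange_one_cons (by omega : (1 : Int) < L), List.foldl_cons]
    have hstep1 :
        (if (PySem.List.pyGetD (x :: (vy, ly) :: t') (1 - 1) ((0 : Int), ' ')).2 ≠ (PySem.List.pyGetD (x :: (vy, ly) :: t') 1 ((0 : Int), ' ')).2 then c + 1 else c)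
        = (if x.2 ≠ ly then c + 1 else c) := by
      rw [show (1 : Int) - 1 = 0 by omega, PySem.List.pyGetD_zero_cons,
        pvGetD_cons_pos (by omega : (0 : Int) < 1), show (1 : Int) - 1 = 0 by omega,
        PySem.List.pyGetD_zero_cons]
    rw [hstep1]
    have hshift : PySem.List.pyRange 2 L 1 = (PySem.List.pyRange 1 (L - 1) 1).map (· + 1) := by
      have := pvRange_shift 1 (L - 1)
      rw [show L - 1 + 1 = L by omega] at this
      exact this
    rw [show (1 : Int) + 1 = 2 from rfl] at *
    rw [hshift, List.foldl_map]
    rw [PySem.List.foldl_congr_mem _ _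
      (fun cnt i =>
        if (PySem.List.pyGetD ((vy, ly) :: t') (i - 1) ((0 : Int), ' ')).2 ≠ (PySem.List.pyGetD ((vy, ly) :: t') i ((0 : Int), ' ')).2
        then cnt + 1 else cnt) _
      (by
        intro acc i hi
        have h1 : 1 ≤ i := (PySem.List.mem_pyRange_one.mp hi).1
        rw [show i + 1 - 1 = i by omega, pvGetD_cons_pos (by omega : (0 : Int) < i),
          pvGetD_cons_pos (by omega : (0 : Int) < i + 1), show i + 1 - 1 = i by omega])]
    have hlen2 : L - 1 = ((((vy, ly) :: t').length : Int)) := by simp [hL]; omega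
    rw [hlen2, ih (vy, ly) (if x.2 ≠ ly then c + 1 else c)]
    rfl

theorem pvAdj_all (p : Char) (t : List (Int × Char)) : ∀ (c : Int), (∀ x ∈ t, x.2 = p) → pvAdj p t c = c := by
  induction t with
  | nil => intro c _; rfl
  | cons y t ih =>
    intro c h
    obtain ⟨v, l⟩ := y
    have hl : l = p := h (v, l) (by simp)
    subst hl
    simp only [pvAdj, ne_eq, not_true_eq_false, if_false]
    exact ih c (fun x hx => h x (List.mem_cons_of_mem _ hx))

-- Python's sort of the [value, label] pairs is the sort by the lexicographic key
theorem pvSorted2_eq_sorted_lex (xs : List (Int × Char)) :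
    PySem.List.sorted2 xs Prod.fst Prod.snd = PySem.List.sorted xs (fun p => (toLex p : Lex (Int × Char))) := by
  unfold PySem.List.sorted2 PySem.List.sorted
  have hfun : (fun (a b : Int × Char) => decide (a.1 < b.1) || (!decide (b.1 < a.1) && decide (a.2 < b.2)))
      = (fun a b => decide ((toLex a : Lex (Int × Char)) < toLex b)) := by
    funext a b
    rcases a with ⟨a1, a2⟩; rcases b with ⟨b1, b2⟩
    rw [Bool.eq_iff_iff]
    simp only [Bool.or_eq_true, Bool.and_eq_true, Bool.not_eq_true',
      decide_eq_true_eq, decide_eq_false_iff_not, Prod.Lex.lt_iff]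
    constructor
    · rintro (h | ⟨h1, h2⟩)
      · exact Or.inl h
      · rcases lt_or_eq_of_le (not_lt.mp h1) with h' | h'
        · exact Or.inl h'
        · exact Or.inr ⟨h', h2⟩
    · rintro (h | ⟨h1, h2⟩)
      · exact Or.inl h
      · subst h1; exact Or.inr ⟨not_lt.mpr le_rfl, h2⟩
  simp only [if_neg (by decide : ¬ (false = true))]
  rw [hfun]

theorem pvMem_mergeP (ws ap : List Int) :
    ∀ p ∈ pvMergeP ws ap, (p.2 = 'w' ∧ p.1 ∈ ws) ∨ (p.2 = 'a' ∧ p.1 ∈ ap) := by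
  fun_induction pvMergeP ws ap with
  | case1 => simp [pvMergeP_nil_nil]
  | case2 a ap ih =>
    intro p hp
    rcases List.mem_cons.mp hp with h | h
    · subst h; simp
    · rcases ih p h with ⟨h1, h2⟩ | ⟨h1, h2⟩
      · simp at h2
      · exact Or.inr ⟨h1, List.mem_cons_of_mem _ h2⟩
  | case3 w ws' ih =>
    intro p hp
    rcases List.mem_cons.mp hp with h | h
    · subst h; simp
    · rcases ih p h with ⟨h1, h2⟩ | ⟨h1, h2⟩
      · exact Or.inl ⟨h1, List.mem_cons_of_mem _ h2⟩
      · simp at h2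
  | case4 w ws' a ap hle ih =>
    intro p hp
    rcases List.mem_cons.mp hp with h | h
    · subst h; simp
    · rcases ih p h with ⟨h1, h2⟩ | ⟨h1, h2⟩
      · exact Or.inl ⟨h1, h2⟩
      · exact Or.inr ⟨h1, List.mem_cons_of_mem _ h2⟩
  | case5 w ws' a ap hle ih =>
    intro p hp
    rcases List.mem_cons.mp hp with h | h
    · subst h; simp
    · rcases ih p h with ⟨h1, h2⟩ | ⟨h1, h2⟩
      · exact Or.inl ⟨h1, List.mem_cons_of_mem _ h2⟩
      · exact Or.inr ⟨h1, h2⟩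

theorem pvMergeP_perm (ws ap : List Int) :
    (pvMergeP ws ap).Perm (ws.map (fun v => (v, 'w')) ++ ap.map (fun v => (v, 'a'))) := by
  fun_induction pvMergeP ws ap with
  | case1 => simp [pvMergeP_nil_nil]
  | case2 a ap ih => simpa using ih.cons ((a, 'a') : Int × Char)
  | case3 w ws' ih => simpa using ih.cons ((w, 'w') : Int × Char)
  | case4 w ws' a ap hle ih =>
    exact (ih.cons ((a, 'a') : Int × Char)).trans List.perm_middle.symm
  | case5 w ws' a ap hle ih =>
    simpa using ih.cons ((w, 'w') : Int × Char)

theorem pvKeyle_same (x y : Int) (c : Char) (h : x ≤ y) : (toLex (x, c) : Lex (Int × Char)) ≤ toLex (y, c) := by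
  rw [Prod.Lex.le_iff]
  rcases lt_or_eq_of_le h with h' | h'
  · exact Or.inl h'
  · exact Or.inr ⟨h', le_rfl⟩

theorem pvKeyle_aw (x y : Int) (h : x ≤ y) : (toLex (x, 'a') : Lex (Int × Char)) ≤ toLex (y, 'w') := by
  rw [Prod.Lex.le_iff]
  rcases lt_or_eq_of_le h with h' | h'
  · exact Or.inl h'
  · exact Or.inr ⟨h', by show ('a' : Char) ≤ 'w'; decide⟩

theorem pvKeyle_lt (x y : Int) (c d : Char) (h : x < y) : (toLex (x, c) : Lex (Int × Char)) ≤ toLex (y, d) := by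
  rw [Prod.Lex.le_iff]; exact Or.inl h

theorem pvMergeP_pairwise (ws ap : List Int) :
    ws.Pairwise (· ≤ ·) → ap.Pairwise (· ≤ ·) →
    (pvMergeP ws ap).Pairwise (fun p q => (toLex p : Lex (Int × Char)) ≤ toLex q) := by
  induction ws, ap using pvMergeP.induct with
  | case1 => intro _ _; rw [pvMergeP_nil_nil]; exact List.Pairwise.nil
  | case2 a ap ih =>
    intro _ ha
    rw [pvMergeP_nil_cons]
    refine List.Pairwise.cons ?_ (ih List.Pairwise.nil (List.Pairwise.sublist (List.sublist_cons_self _ _) ha))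
    intro q hq
    rcases pvMem_mergeP [] ap q hq with ⟨_, h2⟩ | ⟨h1, h2⟩
    · simp at h2
    · obtain ⟨q1, q2⟩ := q
      simp only at h1; subst h1
      exact pvKeyle_same _ _ _ (List.rel_of_pairwise_cons ha h2)
  | case3 w ws' ih =>
    intro hw _
    rw [pvMergeP_cons_nil]
    refine List.Pairwise.cons ?_ (ih (List.Pairwise.sublist (List.sublist_cons_self _ _) hw) List.Pairwise.nil)
    intro q hq
    rcases pvMem_mergeP ws' [] q hq with ⟨h1, h2⟩ | ⟨_, h2⟩
    · obtain ⟨q1, q2⟩ := q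
      simp only at h1; subst h1
      exact pvKeyle_same _ _ _ (List.rel_of_pairwise_cons hw h2)
    · simp at h2
  | case4 w ws' a ap hle ih =>
    intro hw ha
    rw [pvMergeP_cons_cons, if_pos hle]
    refine List.Pairwise.cons ?_ (ih hw (List.Pairwise.sublist (List.sublist_cons_self _ _) ha))
    intro q hq
    rcases pvMem_mergeP (w :: ws') ap q hq with ⟨h1, h2⟩ | ⟨h1, h2⟩
    · obtain ⟨q1, q2⟩ := q
      simp only at h1; subst h1
      rcases List.mem_cons.mp h2 with h3 | h3
      · subst h3; exact pvKeyle_aw _ _ hle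
      · exact pvKeyle_aw _ _ (hle.trans (List.rel_of_pairwise_cons hw h3))
    · obtain ⟨q1, q2⟩ := q
      simp only at h1; subst h1
      exact pvKeyle_same _ _ _ (List.rel_of_pairwise_cons ha h2)
  | case5 w ws' a ap hle ih =>
    intro hw ha
    rw [pvMergeP_cons_cons, if_neg hle]
    refine List.Pairwise.cons ?_ (ih (List.Pairwise.sublist (List.sublist_cons_self _ _) hw) ha)
    intro q hq
    rcases pvMem_mergeP ws' (a :: ap) q hq with ⟨h1, h2⟩ | ⟨h1, h2⟩
    · obtain ⟨q1, q2⟩ := q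
      simp only at h1; subst h1
      exact pvKeyle_same _ _ _ (List.rel_of_pairwise_cons hw h2)
    · obtain ⟨q1, q2⟩ := q
      simp only at h1; subst h1
      have hwa : w < a := not_le.mp hle
      rcases List.mem_cons.mp h2 with h3 | h3
      · subst h3; exact pvKeyle_lt _ _ _ _ hwa
      · exact pvKeyle_lt _ _ _ _ (hwa.trans_le (List.rel_of_pairwise_cons ha h3))

theorem pvLoop_nil_nil (prev : Option Char) (cnt : Int) : pvLoop [] [] prev cnt = cnt := by rw [pvLoop.eq_def]
theorem pvLoop_nil_cons (a : Int) (ap : List Int) (prev : Option Char) (cnt : Int) :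
    pvLoop [] (a :: ap) prev cnt = pvLoop [] ap (some 'a') (pvBump prev 'a' cnt) := by rw [pvLoop.eq_def]
theorem pvLoop_cons_nil (w : Int) (ws' : List Int) (prev : Option Char) (cnt : Int) :
    pvLoop (w :: ws') [] prev cnt = pvLoop ws' [] (some 'w') (pvBump prev 'w' cnt) := by rw [pvLoop.eq_def]
theorem pvLoop_cons_cons (w a : Int) (ws' ap : List Int) (prev : Option Char) (cnt : Int) :
    pvLoop (w :: ws') (a :: ap) prev cnt =
      if a ≤ w then pvLoop (w :: ws') ap (some 'a') (pvBump prev 'a' cnt)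
      else pvLoop ws' (a :: ap) (some 'w') (pvBump prev 'w' cnt) := by rw [pvLoop.eq_def]

theorem pvBump_some (p l : Char) (cnt : Int) : pvBump (some p) l cnt = if p = l then cnt else cnt + 1 := by
  simp only [pvBump, ne_eq]
  rcases eq_or_ne l p with h | h
  · simp [h]
  · simp [h, Ne.symm h]

theorem pvLoop_some (ws ap : List Int) : ∀ (p : Char) (cnt : Int),
    pvLoop ws ap (some p) cnt = pvAdj p (pvMergeP ws ap) cnt := by
  fun_induction pvMergeP ws ap with
  | case1 => intro p cnt; rw [pvLoop_nil_nil]; rfl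
  | case2 a ap ih =>
    intro p cnt
    rw [pvLoop_nil_cons]
    rw [ih]
    show _ = pvAdj 'a' (pvMergeP [] ap) (if p ≠ 'a' then cnt + 1 else cnt)
    rw [pvBump_some]
    simp [ite_not]
  | case3 w ws' ih =>
    intro p cnt
    rw [pvLoop_cons_nil, ih]
    show _ = pvAdj 'w' (pvMergeP ws' []) (if p ≠ 'w' then cnt + 1 else cnt)
    rw [pvBump_some]
    simp [ite_not]
  | case4 w ws' a ap hle ih =>
    intro p cnt
    rw [pvLoop_cons_cons, if_pos hle, ih]
    show _ = pvAdj 'a' (pvMergeP (w :: ws') ap) (if p ≠ 'a' then cnt + 1 else cnt)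
    rw [pvBump_some]
    simp [ite_not]
  | case5 w ws' a ap hle ih =>
    intro p cnt
    rw [pvLoop_cons_cons, if_neg hle, ih]
    show _ = pvAdj 'w' (pvMergeP ws' (a :: ap)) (if p ≠ 'w' then cnt + 1 else cnt)
    rw [pvBump_some]
    simp [ite_not]

theorem pvLoop_none (ws ap : List Int) (cnt : Int) :
    pvLoop ws ap none cnt = match pvMergeP ws ap with
      | [] => cnt
      | (_, l) :: t => pvAdj l t cnt := by
  match ws, ap with
  | [], [] => rw [pvLoop_nil_nil, pvMergeP_nil_nil]
  | [], a :: ap => rw [pvLoop_nil_cons, pvLoop_some, pvMergeP_nil_cons]; rfl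
  | w :: ws', [] => rw [pvLoop_cons_nil, pvLoop_some, pvMergeP_cons_nil]; rfl
  | w :: ws', a :: ap =>
    rw [pvLoop_cons_cons]
    by_cases h : a ≤ w
    · rw [if_pos h, pvLoop_some]
      have : pvMergeP (w :: ws') (a :: ap) = (a, 'a') :: pvMergeP (w :: ws') ap := by
        rw [pvMergeP_cons_cons, if_pos h]
      rw [this]
      rfl
    · rw [if_neg h, pvLoop_some]
      have : pvMergeP (w :: ws') (a :: ap) = (w, 'w') :: pvMergeP ws' (a :: ap) := by
        rw [pvMergeP_cons_cons, if_neg h]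
      rw [this]
      rfl

-- building loops of A produce the tagged prefixes
theorem pvBuild (xs : List Int) (ch : Char) : ∀ (k : Nat), k ≤ xs.length → ∀ (init : List (Int × Char)),
    (PySem.List.pyRange 0 (k : Int) 1).foldl
      (fun acc i => acc ++ [(PySem.List.pyGetD xs i 0, ch)]) init
      = init ++ (xs.take k).map (fun v => (v, ch)) := by
  intro k
  induction k with
  | zero => intro _ init; rw [show ((0 : Nat) : Int) = 0 by rfl, PySem.List.pyRange_one_eq_nil le_rfl]; simp
  | succ k ih =>
    intro hk init
    have hcast : ((k + 1 : Nat) : Int) = (k : Int) + 1 := by push_cast; ring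
    rw [hcast, PySem.List.pyRange_one_succ_right (by positivity), List.foldl_append, ih (by omega) init]
    simp only [List.foldl_cons, List.foldl_nil]
    have hklt : k < xs.length := by omega
    rw [PySem.List.pyGetD_natCast, List.getD_eq_getElem _ _ hklt]
    have hklt2 : k < (xs.map (fun v => (v, ch))).length := by simpa using hklt
    have htake : List.take (k + 1) (List.map (fun v => (v, ch)) xs)
        = List.take k (List.map (fun v => (v, ch)) xs) ++ [(xs[k], ch)] := by
      rw [List.take_add_one, List.getElem?_eq_getElem hklt2]
      simp
    simp [htake, List.append_assoc]

-- a one-label tagged list has no transitions, whatever order it is scanned in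
theorem pvAll_label_zero (l : List Int) (ch : Char) :
    (PySem.List.pyRange 1 (((PySem.List.sorted2 (l.map (fun v => (v, ch))) Prod.fst Prod.snd).length : Int)) 1).foldl
      (fun cnt i =>
        if (PySem.List.pyGetD (PySem.List.sorted2 (l.map (fun v => (v, ch))) Prod.fst Prod.snd) (i - 1) ((0 : Int), ' ')).2
          ≠ (PySem.List.pyGetD (PySem.List.sorted2 (l.map (fun v => (v, ch))) Prod.fst Prod.snd) i ((0 : Int), ' ')).2
        then cnt + 1 else cnt) (0 : Int) = 0 := by
  have hmem : ∀ p ∈ PySem.List.sorted2 (l.map (fun v => (v, ch))) Prod.fst Prod.snd, (p : Int × Char).2 = ch := by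
    intro p hp
    have := (PySem.List.sorted2_perm (l.map (fun v => (v, ch))) Prod.fst Prod.snd false).mem_iff.mp hp
    obtain ⟨v, _, rfl⟩ := List.mem_map.mp this
    rfl
  cases hres : PySem.List.sorted2 (l.map (fun v => (v, ch))) Prod.fst Prod.snd with
  | nil =>
    rw [show ((([] : List (Int × Char)).length : Int)) = 0 by simp,
      PySem.List.pyRange_one_eq_nil (by omega), List.foldl_nil]
  | cons x t =>
    rw [pvFold_eq_adj]
    have hx : x.2 = ch := hmem x (hres ▸ List.mem_cons_self)
    rw [hx]
    exact pvAdj_all ch t 0 (fun y hy => hmem y (hres ▸ List.mem_cons_of_mem _ hy))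

-- ===== VERDICT (by name: the statement is the Claim_ definition above) =====
theorem computeDeviceCrossovers_spec : Claim_equal_computeDeviceCrossovers := by
  intro n web m app _hdom hpre
  unfold Spec_computeDeviceCrossovers
  simp only [computeDeviceCrossovers, computeDeviceCrossovers_alt]
  by_cases hz : n = 0 ∨ m = 0
  · rw [if_pos hz, if_pos (by rcases hz with h | h; exacts [Or.inl (le_of_eq h), Or.inr (le_of_eq h)])]
  · rw [if_neg hz]
    push_neg at hz
    obtain ⟨hn0, hm0⟩ := hz
    have hlen : n ≤ (web.length : Int) ∧ m ≤ (app.length : Int) := by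
      rcases hpre with h | h | h
      · exact absurd h hn0
      · exact absurd h hm0
      · exact h
    by_cases hneg : n ≤ 0 ∨ m ≤ 0
    · rw [if_pos hneg]
      -- A also returns 0: at least one of the tagged lists is empty, so all labels agree
      rcases hneg with hn | hm
      · have hn' : n < 0 := lt_of_le_of_ne hn hn0
        rw [PySem.List.pyRange_one_eq_nil (le_of_lt hn'), List.foldl_nil]
        by_cases hm2 : m ≤ 0
        · rw [PySem.List.pyRange_one_eq_nil hm2, List.foldl_nil]
          rw [show PySem.List.sorted2 ([] : List (Int × Char)) Prod.fst Prod.snd = [] from rfl]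
          rw [show ((([] : List (Int × Char)).length : Int)) = 0 by simp,
            PySem.List.pyRange_one_eq_nil (by omega), List.foldl_nil]
        · push_neg at hm2
          rw [show m = ((m.toNat : Nat) : Int) by omega,
            pvBuild app 'a' m.toNat (by omega) [], List.nil_append]
          exact pvAll_label_zero _ 'a'
      · have hm' : m < 0 := lt_of_le_of_ne hm hm0
        by_cases hn2 : n ≤ 0
        · rw [PySem.List.pyRange_one_eq_nil hn2, List.foldl_nil,
            PySem.List.pyRange_one_eq_nil (le_of_lt hm'), List.foldl_nil]
          rw [show PySem.List.sorted2 ([] : List (Int × Char)) Prod.fst Prod.snd = [] from rfl]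
          rw [show ((([] : List (Int × Char)).length : Int)) = 0 by simp,
            PySem.List.pyRange_one_eq_nil (by omega), List.foldl_nil]
        · push_neg at hn2
          rw [show n = ((n.toNat : Nat) : Int) by omega,
            pvBuild web 'w' n.toNat (by omega) [], List.nil_append,
            PySem.List.pyRange_one_eq_nil (le_of_lt hm'), List.foldl_nil]
          exact pvAll_label_zero _ 'w'
    · rw [if_neg hneg]
      push_neg at hneg
      obtain ⟨hn, hm⟩ := hneg
      -- main case: 0 < n ≤ |web|, 0 < m ≤ |app|
      rw [show n = ((n.toNat : Nat) : Int) by omega,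
        pvBuild web 'w' n.toNat (by omega) [], List.nil_append,
        show m = ((m.toNat : Nat) : Int) by omega,
        pvBuild app 'a' m.toNat (by omega) _]
      rw [PySem.List.slice_to web (by omega : (0 : Int) ≤ ((n.toNat : Nat) : Int)),
        PySem.List.slice_to app (by omega : (0 : Int) ≤ ((m.toNat : Nat) : Int))]
      rw [show (((n.toNat : Nat) : Int)).toNat = n.toNat by omega,
        show (((m.toNat : Nat) : Int)).toNat = m.toNat by omega]
      set ws := PySem.List.sorted (web.take n.toNat) (fun x => x) with hws
      set ap := PySem.List.sorted (app.take m.toNat) (fun x => x) with hap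
      have hkey : PySem.List.sorted2
          ((web.take n.toNat).map (fun v => (v, 'w')) ++ (app.take m.toNat).map (fun v => (v, 'a')))
          Prod.fst Prod.snd = pvMergeP ws ap := by
        rw [pvSorted2_eq_sorted_lex]
        refine PySem.List.eq_of_perm_of_pairwise_le_of_injective
          (fun p => (toLex p : Lex (Int × Char))) (fun a b h => by simpa using h) ?_ ?_ ?_
        · refine (PySem.List.sorted_perm _ _ _).trans ?_
          refine List.Perm.trans ?_ (pvMergeP_perm ws ap).symm
          exact List.Perm.append ((PySem.List.sorted_perm _ _ _).symm.map _)
            ((PySem.List.sorted_perm _ _ _).symm.map _)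
        · exact PySem.List.sorted_pairwise _ _
        · exact pvMergeP_pairwise ws ap (PySem.List.sorted_pairwise _ _) (PySem.List.sorted_pairwise _ _)
      rw [hkey, pvLoop_none]
      -- both sides now scan pvMergeP ws ap
      have hwsne : ws ≠ [] := by
        rw [hws, Ne, PySem.List.sorted_eq_nil_iff]
        intro h
        rcases List.take_eq_nil_iff.mp h with h0 | h0
        · omega
        · subst h0; simp at hlen; omega
      have hapne : ap ≠ [] := by
        rw [hap, Ne, PySem.List.sorted_eq_nil_iff]
        intro h
        rcases List.take_eq_nil_iff.mp h with h0 | h0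
        · omega
        · subst h0; simp at hlen; omega
      obtain ⟨w, ws', hws'⟩ := List.exists_cons_of_ne_nil hwsne
      obtain ⟨a, ap', hap'⟩ := List.exists_cons_of_ne_nil hapne
      rw [hws', hap', pvMergeP_cons_cons]
      by_cases h : a ≤ w
      · rw [if_pos h]
        rw [pvFold_eq_adj]
      · rw [if_neg h]
        rw [pvFold_eq_adj]
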